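-- pv_equiv track=rewrite | github.com/caravanlizzy/Henrieke | python/game.py | getroundresults
-- ===== SOURCE A (Python) =====
-- from collections import Counter
--
-- def getroundresults(playedcards):
--     rr = ["loss"] * len(playedcards)
--     highestcard = max(playedcards)
--     occurence = Counter(playedcards)[highestcard]
--     if occurence == 1:
--         index = playedcards.index(highestcard)
--         rr[index] = "win"
--     else:
--         for i in range(len(rr)):
--             if(playedcards[i] == highestcard):
--                 rr[i] = "tie"
--     return rr
-- ===== SOURCE B (Python) =====
-- def getroundresults(playedcards):
--     # Sort a copy: the last element is the highest card, and a tie exists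
--     # exactly when the two last sorted cards are equal. No counting needed.
--     ranked = sorted(playedcards)
--     highest = ranked[-1]
--     mark = "tie" if len(ranked) > 1 and ranked[-2] == highest else "win"
--     return [mark if c == highest else "loss" for c in playedcards]
-- ===== Notes on version B (the rewrite author's own statement) =====
-- stated objective: alternative
-- what changed: Instead of A's max() + Counter occurrence count + (.index single assignment or an explicit tie-marking index loop), B sorts a copy, reads the highest card from the sorted end, detects a tie by adjacency of the two last sorted elements, and emits the labels in one uniform pass.
import Mathlib
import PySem

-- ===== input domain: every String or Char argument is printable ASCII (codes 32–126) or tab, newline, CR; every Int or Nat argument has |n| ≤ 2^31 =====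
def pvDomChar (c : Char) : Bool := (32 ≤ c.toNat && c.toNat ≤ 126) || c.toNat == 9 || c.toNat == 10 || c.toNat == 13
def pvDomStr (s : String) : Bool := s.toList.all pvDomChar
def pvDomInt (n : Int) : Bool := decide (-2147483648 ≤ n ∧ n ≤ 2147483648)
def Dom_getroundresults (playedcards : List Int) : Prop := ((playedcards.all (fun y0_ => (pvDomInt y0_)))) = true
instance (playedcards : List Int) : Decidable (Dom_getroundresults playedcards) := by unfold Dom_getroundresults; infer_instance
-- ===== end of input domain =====

-- B replaces A's staged passes (max(), Counter lookup, then .index assignment or a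
-- tie-marking index loop) by sorting a copy: the highest card is the sorted end, a tie
-- is adjacency of the two last sorted elements, labels come from one uniform pass (alternative).

-- ===== PORT A =====
def getroundresults (playedcards : List Int) : List String :=
  let rr := List.replicate playedcards.length "loss"
  match PySem.List.max? playedcards (fun x => x) with
  | none => rr   -- unreachable: max([]) raises ValueError, excluded by Pre_
  | some highestcard =>
    let occurence : Int := (PySem.Dict.counter playedcards).getD highestcard 0
    if occurence = 1 then
      match PySem.List.index? playedcards highestcard with
      | none => rr   -- unreachable: highestcard ∈ playedcards
      | some index => PySem.List.pySetD rr (index : Int) "win"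
    else
      (List.range rr.length).foldl
        (fun rr (i : Nat) =>
          if PySem.List.pyGetD playedcards (i : Int) 0 = highestcard
          then PySem.List.pySetD rr (i : Int) "tie" else rr) rr

-- ===== PORT B =====
def getroundresults_alt (playedcards : List Int) : List String :=
  let ranked := PySem.List.sorted playedcards (fun x => x) false
  match PySem.List.pyGet? ranked (-1) with
  | none => []   -- unreachable: ranked[-1] raises IndexError on [], excluded by Pre_
  | some highest =>
    -- Python's short-circuit 'and' only reads ranked[-2] when len > 1; pyGetD's
    -- default is consulted only when that first conjunct is already false, so exact.
    let mark := if 1 < ranked.length ∧ PySem.List.pyGetD ranked (-2) 0 = highest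
                then "tie" else "win"
    playedcards.map (fun c => if c = highest then mark else "loss")

-- ===== PRECONDITION & SPEC =====
-- Pre_ excludes only the empty list, on which A raises ValueError from max([]) (and B IndexError).
def Pre_getroundresults (playedcards : List Int) : Prop := playedcards ≠ []
instance (playedcards : List Int) : Decidable (Pre_getroundresults playedcards) := by
  unfold Pre_getroundresults; infer_instance
def pvWitness_getroundresults : List Int := ([3, 1, 3])

def Spec_getroundresults (playedcards : List Int) (out : List String) : Prop := out = getroundresults_alt playedcards
instance (playedcards : List Int) (out : List String) : Decidable (Spec_getroundresults playedcards out) := by unfold Spec_getroundresults; infer_instance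

-- ===== CLAIM (what is proved, stated in full; the proofs are below) =====
def Claim_equal_getroundresults : Prop := ∀ (playedcards : List Int), Dom_getroundresults playedcards → Pre_getroundresults playedcards → Spec_getroundresults playedcards (getroundresults playedcards)

-- ===== LEMMAS AND PROOFS =====

-- m ∉ t → labeling t labels everything "loss"
lemma pv_map_loss (t : List Int) (m : Int) (lab : String) (h : m ∉ t) :
    t.map (fun c => if c = m then lab else "loss") = List.replicate t.length "loss" := by
  induction t with
  | nil => simp
  | cons x s ih =>
    simp only [List.mem_cons, not_or] at h
    have hx : x ≠ m := fun e => h.1 e.symm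
    simp [List.replicate_succ, hx, ih h.2]

-- the "win" branch of A: count = 1 ⇒ setting the first index in the all-loss list is the labeling pass
lemma pv_win_case (xs : List Int) (m : Int) (hc : xs.count m = 1) :
    ∃ i, PySem.List.index? xs m = some i ∧
      PySem.List.pySetD (List.replicate xs.length "loss") (i : Int) "win"
        = xs.map (fun c => if c = m then "win" else "loss") := by
  induction xs with
  | nil => simp at hc
  | cons x t ih =>
    by_cases hx : x = m
    · subst hx
      have ht : x ∉ t := by
        rw [List.count_cons_self] at hc
        exact List.count_eq_zero.mp (by omega)
      refine ⟨0, PySem.List.index?_cons_self x t, ?_⟩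
      rw [PySem.List.pySetD_of_nonneg _ _ (by norm_num)]
      simp [List.replicate_succ, pv_map_loss t x "win" ht]
    · have hct : t.count m = 1 := by
        rw [List.count_cons_of_ne hx] at hc
        exact hc
      obtain ⟨i, hi, hset⟩ := ih hct
      refine ⟨i + 1, ?_, ?_⟩
      · rw [PySem.List.index?_cons_of_ne t hx, hi]; rfl
      · rw [PySem.List.pySetD_natCast] at hset ⊢
        simp [List.replicate_succ, hx, hset]

-- the tie loop of A: characterisation of the foldl over range n
lemma pv_tie_foldl (xs : List Int) (m : Int) (n : Nat) (hn : n ≤ xs.length)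
    (rr : List String) (hlen : rr.length = xs.length) :
    ∃ out, (List.range n).foldl
        (fun rr (i : Nat) =>
          if PySem.List.pyGetD xs (i : Int) 0 = m
          then PySem.List.pySetD rr (i : Int) "tie" else rr) rr = out ∧
      out.length = xs.length ∧
      ∀ j, j < xs.length →
        out.getD j "?" = if (j < n ∧ xs.getD j 0 = m) then "tie" else rr.getD j "?" := by
  induction n with
  | zero => exact ⟨rr, rfl, hlen, by simp⟩
  | succ n ih =>
    obtain ⟨out, hout, hol, hoget⟩ := ih (by omega)
    rw [List.range_succ, List.foldl_append, hout]
    have hnl : n < xs.length := by omega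
    have hget : PySem.List.pyGetD xs (n : Int) 0 = xs.getD n 0 := PySem.List.pyGetD_natCast xs n 0
    simp only [List.foldl_cons, List.foldl_nil, hget, PySem.List.pySetD_natCast]
    by_cases hm : xs.getD n 0 = m
    · refine ⟨out.set n "tie", by rw [if_pos hm], by simp [hol], ?_⟩
      intro j hj
      rcases eq_or_ne j n with rfl | hne
      · rw [List.getD_eq_getElem _ _ (by simpa [hol] using hj), List.getElem_set, if_pos rfl,
          if_pos ⟨by omega, hm⟩]
      · have hset : (out.set n "tie").getD j "?" = out.getD j "?" := by
          by_cases hjl : j < out.length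
          · rw [List.getD_eq_getElem _ _ (by simpa using hjl), List.getElem_set,
              if_neg (fun e => hne e.symm), List.getD_eq_getElem _ _ hjl]
          · rw [List.getD_eq_default _ _ (by simpa using hjl), List.getD_eq_default _ _ (by omega)]
        rw [hset, hoget j hj]
        by_cases hj' : j < n ∧ xs.getD j 0 = m
        · rw [if_pos hj', if_pos ⟨by omega, hj'.2⟩]
        · rw [if_neg hj', if_neg (fun h => hj' ⟨by omega, h.2⟩)]
    · refine ⟨out, by rw [if_neg hm], hol, ?_⟩
      intro j hj
      rw [hoget j hj]
      by_cases hj' : j < n ∧ xs.getD j 0 = m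
      · rw [if_pos hj', if_pos ⟨by omega, hj'.2⟩]
      · refine (if_neg (fun h => hj' ⟨?_, h.2⟩)).trans (if_neg hj').symm |>.symm
        rcases eq_or_ne j n with rfl | hne
        · exact absurd h.2 hm
        · omega

-- A's result equals the uniform labeling by the max value
lemma pv_A_map (xs : List Int) (m : Int) (hmax : PySem.List.max? xs (fun x => x) = some m) :
    getroundresults xs
      = xs.map (fun c => if c = m then (if xs.count m = 1 then "win" else "tie") else "loss") := by
  unfold getroundresults
  rw [hmax]
  simp only [PySem.Dict.getD_counter]
  by_cases h1 : xs.count m = 1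
  · rw [if_pos (by exact_mod_cast h1), if_pos h1]
    obtain ⟨i, hi, hset⟩ := pv_win_case xs m h1
    rw [hi]
    exact hset
  · rw [if_neg (by exact_mod_cast fun h => h1 (by exact_mod_cast h)), if_neg h1]
    obtain ⟨out, hout, hol, hoget⟩ :=
      pv_tie_foldl xs m xs.length le_rfl (List.replicate xs.length "loss") (by simp)
    rw [List.length_replicate, hout]
    apply List.ext_getElem (by simp [hol])
    intro j hj hj'
    have h := hoget j (by omega)
    have hjx : j < xs.length := by simpa [hol] using hj
    rw [List.getD_eq_getElem _ _ (show j < out.length by omega),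
      List.getD_eq_getElem _ _ (show j < xs.length from hjx),
      List.getD_eq_getElem _ _ (show j < (List.replicate xs.length "loss").length by
        simpa using hjx)] at h
    rw [h, List.getElem_map, List.getElem_replicate]
    by_cases hm : xs[j] = m <;> simp [hm, hjx]

-- in the sorted copy: the last element is the max, and the two last elements are
-- equal exactly when the max occurs more than once
lemma pv_sorted_facts (xs : List Int) (hne : xs ≠ []) :
    (PySem.List.pyGetD (PySem.List.sorted xs (fun x => x) false) (-1) 0 ∈ xs
      ∧ (∀ y ∈ xs, y ≤ PySem.List.pyGetD (PySem.List.sorted xs (fun x => x) false) (-1) 0))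
    ∧ (xs.count (PySem.List.pyGetD (PySem.List.sorted xs (fun x => x) false) (-1) 0) ≠ 1
        ↔ (1 < (PySem.List.sorted xs (fun x => x) false).length ∧
           PySem.List.pyGetD (PySem.List.sorted xs (fun x => x) false) (-2) 0
             = PySem.List.pyGetD (PySem.List.sorted xs (fun x => x) false) (-1) 0)) := by
  set r := PySem.List.sorted xs (fun x => x) false with hr
  have hperm : r.Perm xs := PySem.List.sorted_perm xs _ _
  have hpair : List.Pairwise (fun a b : Int => a ≤ b) r := by
    rw [hr]; exact PySem.List.sorted_pairwise xs (fun x => x)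
  have hlen : r.length = xs.length := hperm.length_eq
  clear_value r
  have hpos : 0 < r.length := by
    rw [hlen]; exact List.length_pos_iff.mpr hne
  have hmono : ∀ (p q : Nat) (hp : p < r.length) (hq : q < r.length), p ≤ q → r[p] ≤ r[q] := by
    intro p q hp hq hpq
    rcases Nat.eq_or_lt_of_le hpq with rfl | hlt
    · exact le_refl _
    · exact List.pairwise_iff_getElem.mp hpair p q hp hq hlt
  have hget1 : PySem.List.pyGetD r (-1) 0 = r[r.length - 1]'(by omega) := by
    have := PySem.List.pyGetD_neg_natCast (xs := r) (d := 0) (k := 1) (by omega) (by omega)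
    simpa using this
  rw [hget1]
  set M := r[r.length - 1]'(by omega) with hM
  have hcnt : xs.count M = r.count M := (hperm.count_eq M).symm
  have hMmem : M ∈ r := List.getElem_mem _
  have hc1 : 1 ≤ r.count M := List.count_pos_iff.mpr hMmem
  have hdrop : ∀ h2 : 2 ≤ r.length,
      r.drop (r.length - 2) = [r[r.length - 2]'(by omega), r[r.length - 1]'(by omega)] := by
    intro h2
    rw [List.drop_eq_getElem_cons (by omega)]
    congr 1
    rw [show r.length - 2 + 1 = r.length - 1 by omega,
      List.drop_eq_getElem_cons (by omega)]
    simp [show r.length - 1 + 1 = r.length by omega]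
  have hgetD : ∀ h2 : 2 ≤ r.length,
      PySem.List.pyGetD r (-2) 0 = r[r.length - 2]'(by omega) := by
    intro h2
    have := PySem.List.pyGetD_neg_natCast (xs := r) (d := 0) (k := 2) (by omega) (by omega)
    simpa using this
  have hsplit : ∀ h2 : 2 ≤ r.length,
      r.count M = (r.take (r.length - 2)).count M
        + (if r[r.length - 2]'(by omega) = M then 1 else 0) + 1 := by
    intro h2
    conv_lhs => rw [← List.take_append_drop (r.length - 2) r]
    rw [List.count_append, hdrop h2]
    by_cases he : r[r.length - 2]'(by omega) = M
    · simp [he, ← hM]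
    · simp [he, ← hM]
  refine ⟨⟨hperm.mem_iff.mp (List.getElem_mem _), ?_⟩, ?_, ?_⟩
  · intro y hy
    obtain ⟨i, hi, hig⟩ := List.mem_iff_getElem.mp (hperm.mem_iff.mpr hy)
    calc y = r[i] := hig.symm
      _ ≤ r[r.length - 1] := hmono i (r.length - 1) hi (by omega) (by omega)
  · intro hne1
    have hc2 : 2 ≤ r.count M := by omega
    have hn2 : 2 ≤ r.length := le_trans hc2 List.count_le_length
    refine ⟨by omega, ?_⟩
    rw [hgetD hn2]
    by_contra hneq
    have hc : r.count M = (r.take (r.length - 2)).count M + 1 := by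
      have := hsplit hn2
      rw [if_neg hneq] at this
      omega
    have hmemtk : M ∈ r.take (r.length - 2) := List.count_pos_iff.mp (by omega)
    obtain ⟨i, hi, hig⟩ := List.mem_iff_getElem.mp hmemtk
    have hilt : i < r.length - 2 := by
      simp [List.length_take] at hi
      omega
    have hig' : r[i]'(by omega) = M := by
      rw [← hig, List.getElem_take]
    exact hneq (le_antisymm
      (hM ▸ hmono (r.length - 2) (r.length - 1) (by omega) (by omega) (by omega))
      (hig' ▸ hmono i (r.length - 2) (by omega) (by omega) (by omega)))
  · rintro ⟨hn1, hlast2⟩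
    have hn2 : 2 ≤ r.length := by omega
    rw [hgetD hn2] at hlast2
    have := hsplit hn2
    rw [if_pos hlast2] at this
    omega

theorem getroundresults_spec : Claim_equal_getroundresults := by
  intro xs _ hpre
  unfold Spec_getroundresults
  have hne : xs ≠ [] := hpre
  obtain ⟨⟨hMmem, hMmax⟩, hiff⟩ := pv_sorted_facts xs hne
  set r := PySem.List.sorted xs (fun x => x) false with hr
  set M := PySem.List.pyGetD r (-1) 0 with hM
  have hpos : 0 < r.length := by
    rw [hr, PySem.List.length_sorted]
    exact List.length_pos_iff.mpr hne
  rcases hmax : PySem.List.max? xs (fun x => x) with _ | m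
  · exact absurd ((PySem.List.max?_eq_none_iff xs _).mp hmax) hne
  · have hmM : m = M := by
      have h1 : m ≤ M := hMmax m (PySem.List.max?_mem hmax)
      have h2 : M ≤ m := PySem.List.max?_isMax hmax M hMmem
      omega
    rw [pv_A_map xs m hmax, hmM]
    have hlast : PySem.List.pyGet? r (-1) = some M := by
      have h1 : PySem.List.pyGet? r (-1) = r[r.length - 1]? :=
        PySem.List.pyGet?_neg_ofNat r 1 (by omega) (by omega)
      have h2 : PySem.List.pyGetD r (-1) 0 = r[r.length - 1]'(by omega) := by
        have := PySem.List.pyGetD_neg_natCast (xs := r) (d := 0) (k := 1) (by omega) (by omega)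
        simpa using this
      rw [h1, List.getElem?_eq_getElem (by omega), hM, h2]
    simp only [getroundresults_alt, ← hr, hlast]
    have hmark : (if 1 < r.length ∧ PySem.List.pyGetD r (-2) 0 = M then "tie" else "win")
        = (if xs.count M = 1 then "win" else "tie") := by
      by_cases hc : xs.count M = 1
      · rw [if_pos hc, if_neg (fun h => (hiff.mpr h) hc)]
      · rw [if_neg hc, if_pos (hiff.mp hc)]
    rw [hmark]
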